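-- pv_equiv track=rewrite | github.com/CSStudySession/AlgoInPython | DataStructure/LC346MovingAverageFromDataStream.py | cal_moving_avg_every_other_num
-- ===== SOURCE A (Python) =====
-- import collections
--
-- def cal_moving_avg_every_other_num(nums:list[int], k: int) -> list[int]:
--     ret = []
--     if not nums or k <= 0 or k > len(nums):
--         return ret
--     even_queue, odd_queue = collections.deque(), collections.deque()
--     even_sum, odd_sum = 0, 0
--     for idx in range(len(nums)):
--         if idx % 2 == 0: # 根据下表奇偶性 入不同队列并更新相应sum
--             even_queue.append(nums[idx])
--             even_sum += nums[idx]
--         else: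
--             odd_queue.append(nums[idx])
--             odd_sum += nums[idx]
--         if idx >= k - 1: # 窗口大小等于k了
--             left = idx - k + 1 # 窗口左端点的下标left
--             if left % 2 == 0: # 根据奇偶性 取对应的sum算均值 并移除队列最远的元素
--                 ret.append(even_sum // k)
--                 even_sum -= even_queue.popleft()
--             else:
--                 ret.append(odd_sum // k)
--                 odd_sum -= odd_queue.popleft()
--     return ret
-- ===== SOURCE B (Python) =====
-- def cal_moving_avg_every_other_num(nums: list[int], k: int) -> list[int]:
--     if not nums or k <= 0 or k > len(nums):
--         return []
--     return [sum(nums[j + t] for t in range(0, k, 2)) // k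
--             for j in range(len(nums) - k + 1)]
-- ===== Notes on version B (the rewrite author's own statement) =====
-- stated objective: simpler
-- what changed: Replaced the two parity deques with incremental sums by a direct per-window computation: for each window start j, sum the elements at j, j+2, ... within the window and floor-divide by k.
import Mathlib
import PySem

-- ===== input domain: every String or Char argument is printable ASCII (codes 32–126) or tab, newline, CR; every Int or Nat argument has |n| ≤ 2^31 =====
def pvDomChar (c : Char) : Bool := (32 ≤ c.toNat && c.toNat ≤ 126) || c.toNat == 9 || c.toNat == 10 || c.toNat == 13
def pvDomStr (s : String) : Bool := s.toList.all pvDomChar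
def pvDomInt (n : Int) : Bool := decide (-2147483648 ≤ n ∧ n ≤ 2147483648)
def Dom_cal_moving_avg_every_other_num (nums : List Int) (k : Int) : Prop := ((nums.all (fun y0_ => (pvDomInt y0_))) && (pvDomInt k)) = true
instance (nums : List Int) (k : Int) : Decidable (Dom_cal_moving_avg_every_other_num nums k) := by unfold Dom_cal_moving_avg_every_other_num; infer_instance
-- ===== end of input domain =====

-- B replaces A's two parity deques and incremental sums by a direct per-window
-- sum of every other element; simpler, not faster.

-- ===== PORT A =====
-- one loop iteration of A: state = (even_queue, odd_queue, even_sum, odd_sum, ret)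
def pvStepA (nums : List Int) (k : Int)
    (st : List Int × List Int × Int × Int × List Int) (idx : Int) :
    List Int × List Int × Int × Int × List Int :=
  let v := PySem.List.pyGetD nums idx 0
  let eq0 := st.1; let oq0 := st.2.1; let es0 := st.2.2.1; let os0 := st.2.2.2.1
  let ret := st.2.2.2.2
  -- if idx % 2 == 0: append to even queue / sum, else odd
  let eq := if PySem.Int.mod idx 2 = 0 then eq0 ++ [v] else eq0
  let es := if PySem.Int.mod idx 2 = 0 then es0 + v else es0
  let oq := if PySem.Int.mod idx 2 = 0 then oq0 else oq0 ++ [v]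
  let os := if PySem.Int.mod idx 2 = 0 then os0 else os0 + v
  if idx ≥ k - 1 then
    let left := idx - k + 1
    if PySem.Int.mod left 2 = 0 then
      (eq.tail, oq, es - eq.headD 0, os, ret ++ [PySem.Int.floordiv es k])
    else
      (eq, oq.tail, es, os - oq.headD 0, ret ++ [PySem.Int.floordiv os k])
  else (eq, oq, es, os, ret)

def cal_moving_avg_every_other_num (nums : List Int) (k : Int) : List Int :=
  if nums = [] ∨ k ≤ 0 ∨ k > (nums.length : Int) then []
  else ((PySem.List.pyRange 0 (nums.length : Int) 1).foldl
          (pvStepA nums k) ([], [], 0, 0, [])).2.2.2.2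

-- ===== PORT B =====
def cal_moving_avg_every_other_num_alt (nums : List Int) (k : Int) : List Int :=
  if nums = [] ∨ k ≤ 0 ∨ k > (nums.length : Int) then []
  else (PySem.List.pyRange 0 ((nums.length : Int) - k + 1) 1).map (fun j =>
    PySem.Int.floordiv
      (((PySem.List.pyRange 0 k 2).map
          (fun t => PySem.List.pyGetD nums (j + t) 0)).sum) k)

-- ===== PRECONDITION & SPEC =====
def Spec_cal_moving_avg_every_other_num (nums : List Int) (k : Int) (out : List Int) : Prop := out = cal_moving_avg_every_other_num_alt nums k
instance (nums : List Int) (k : Int) (out : List Int) : Decidable (Spec_cal_moving_avg_every_other_num nums k out) := by unfold Spec_cal_moving_avg_every_other_num; infer_instance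

-- ===== CLAIM (what is proved, stated in full; the proofs are below) =====
def Claim_equal_cal_moving_avg_every_other_num : Prop := ∀ (nums : List Int) (k : Int), Dom_cal_moving_avg_every_other_num nums k → Spec_cal_moving_avg_every_other_num nums k (cal_moving_avg_every_other_num nums k)

-- ===== LEMMAS AND PROOFS =====

-- nums[i] for a Nat index, default 0 (always in range where used)
def pvG (nums : List Int) (i : Nat) : Int := nums.getD i 0

-- sum of c elements starting at j with stride 2
def pvW (nums : List Int) (j c : Nat) : Int :=
  ((List.range c).map (fun t => pvG nums (j + 2 * t))).sum

-- even/odd queues after p pops, c elements pushed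
def pvQE (nums : List Int) (p c : Nat) : List Int :=
  (List.range (c - p)).map (fun e => pvG nums (2 * (p + e)))
def pvQO (nums : List Int) (p c : Nat) : List Int :=
  (List.range (c - p)).map (fun e => pvG nums (2 * (p + e) + 1))

-- closed form of A's loop state after m iterations
def pvSt (nums : List Int) (kn m : Nat) :
    List Int × List Int × Int × Int × List Int :=
  (pvQE nums ((m + 2 - kn) / 2) ((m + 1) / 2),
   pvQO nums ((m + 1 - kn) / 2) (m / 2),
   (pvQE nums ((m + 2 - kn) / 2) ((m + 1) / 2)).sum,
   (pvQO nums ((m + 1 - kn) / 2) (m / 2)).sum,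
   (List.range (m + 1 - kn)).map
     (fun j => PySem.Int.floordiv (pvW nums j ((kn + 1) / 2)) (kn : Int)))

lemma pvRangeMap_ext {α : Type} (f g : Nat → α) (c1 c2 : Nat)
    (hc : c1 = c2) (hf : ∀ t, t < c2 → f t = g t) :
    (List.range c1).map f = (List.range c2).map g := by
  subst hc
  exact List.map_congr_left (fun t ht => hf t (List.mem_range.mp ht))

lemma pvQE_append (nums : List Int) {p c : Nat} (h : p ≤ c) :
    pvQE nums p (c + 1) = pvQE nums p c ++ [pvG nums (2 * c)] := by
  unfold pvQE
  have h1 : c + 1 - p = (c - p) + 1 := by omega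
  rw [h1, List.range_succ, List.map_append]
  simp only [List.map_cons, List.map_nil]
  congr 3
  omega

lemma pvQO_append (nums : List Int) {p c : Nat} (h : p ≤ c) :
    pvQO nums p (c + 1) = pvQO nums p c ++ [pvG nums (2 * c + 1)] := by
  unfold pvQO
  have h1 : c + 1 - p = (c - p) + 1 := by omega
  rw [h1, List.range_succ, List.map_append]
  simp only [List.map_cons, List.map_nil]
  congr 3
  omega

lemma pvQE_tail (nums : List Int) {p c : Nat} (h : p < c) :
    (pvQE nums p c).tail = pvQE nums (p + 1) c := by
  unfold pvQE
  have h1 : c - p = (c - (p + 1)) + 1 := by omega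
  rw [h1, List.range_succ_eq_map, List.map_cons, List.tail_cons, List.map_map]
  exact pvRangeMap_ext _ _ _ _ rfl (fun t ht => by simp [Function.comp]; congr 1; omega)

lemma pvQO_tail (nums : List Int) {p c : Nat} (h : p < c) :
    (pvQO nums p c).tail = pvQO nums (p + 1) c := by
  unfold pvQO
  have h1 : c - p = (c - (p + 1)) + 1 := by omega
  rw [h1, List.range_succ_eq_map, List.map_cons, List.tail_cons, List.map_map]
  exact pvRangeMap_ext _ _ _ _ rfl (fun t ht => by simp [Function.comp]; congr 1; omega)

lemma pvQE_sum (nums : List Int) (p c : Nat) :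
    (pvQE nums p c).sum = pvW nums (2 * p) (c - p) := by
  unfold pvQE pvW
  congr 1
  exact pvRangeMap_ext _ _ _ _ rfl (fun t ht => by congr 1; omega)

lemma pvQO_sum (nums : List Int) (p c : Nat) :
    (pvQO nums p c).sum = pvW nums (2 * p + 1) (c - p) := by
  unfold pvQO pvW
  congr 1
  exact pvRangeMap_ext _ _ _ _ rfl (fun t ht => by congr 1; omega)

lemma pv_tail_sum (l : List Int) (h : l ≠ []) :
    l.tail.sum = l.sum - l.headD 0 := by
  cases l with
  | nil => simp at h
  | cons x xs => simp [List.sum_cons]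

lemma pvQE_congr (nums : List Int) {p1 c1 p2 c2 : Nat} (hp : p1 = p2) (hc : c1 = c2) :
    pvQE nums p1 c1 = pvQE nums p2 c2 := by rw [hp, hc]
lemma pvQO_congr (nums : List Int) {p1 c1 p2 c2 : Nat} (hp : p1 = p2) (hc : c1 = c2) :
    pvQO nums p1 c1 = pvQO nums p2 c2 := by rw [hp, hc]
lemma pvW_congr (nums : List Int) {j1 c1 j2 c2 : Nat} (hj : j1 = j2) (hc : c1 = c2) :
    pvW nums j1 c1 = pvW nums j2 c2 := by rw [hj, hc]

-- the loop invariant step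
lemma pvStep_inv (nums : List Int) (kn : Nat) (hk : 1 ≤ kn) (m : Nat) :
    pvStepA nums (kn : Int) (pvSt nums kn m) (m : Int) = pvSt nums kn (m + 1) := by
  have hm2 : PySem.Int.mod (m : Int) 2 = ((m % 2 : Nat) : Int) := by
    exact_mod_cast PySem.Int.mod_natCast m 2
  have hget : PySem.List.pyGetD nums (m : Int) 0 = pvG nums m := by
    simp [PySem.List.pyGetD_natCast, pvG]
  simp only [pvStepA, pvSt, hm2, hget]
  by_cases hw : (m : Int) ≥ (kn : Int) - 1
  · have hw' : kn ≤ m + 1 := by omega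
    have hleft : (m : Int) - (kn : Int) + 1 = ((m + 1 - kn : Nat) : Int) := by push_cast [hw']; ring
    have hr2 : PySem.Int.mod ((m + 1 - kn : Nat) : Int) 2 = (((m + 1 - kn) % 2 : Nat) : Int) := by
      exact_mod_cast PySem.Int.mod_natCast (m + 1 - kn) 2
    rw [if_pos hw, hleft, hr2]
    simp only [Nat.cast_eq_zero]
    by_cases hr : (m + 1 - kn) % 2 = 0
    · rw [if_pos hr]
      by_cases hm : m % 2 = 0
      · simp only [if_pos hm]
        have hpp : (m + 2 - kn) / 2 ≤ (m + 1) / 2 := by omega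
        have hgm : pvG nums m = pvG nums (2 * ((m + 1) / 2)) := by congr 1; omega
        have hsum : (pvQE nums ((m+2-kn)/2) ((m+1)/2)).sum + pvG nums (2 * ((m+1)/2))
            = (pvQE nums ((m+2-kn)/2) ((m+1)/2 + 1)).sum := by
          rw [pvQE_append nums hpp]; simp
        have hne : pvQE nums ((m+2-kn)/2) ((m+1)/2 + 1) ≠ [] := by
          unfold pvQE
          simp only [ne_eq, List.map_eq_nil_iff, List.range_eq_nil]
          omega
        rw [hgm, hsum, ← pvQE_append nums hpp, ← pv_tail_sum _ hne, pvQE_tail nums (by omega)]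
        simp only [Prod.mk.injEq]
        refine ⟨pvQE_congr nums (by omega) (by omega), pvQO_congr nums (by omega) (by omega),
          congrArg List.sum (pvQE_congr nums (by omega) (by omega)),
          congrArg List.sum (pvQO_congr nums (by omega) (by omega)), ?_⟩
        rw [show m + 1 + 1 - kn = (m + 1 - kn) + 1 from by omega, List.range_succ, List.map_append]
        congr 1
        rw [pvQE_sum]
        congr 2
        exact pvW_congr nums (by omega) (by omega)
      · simp only [if_neg hm]
        have hpo : (m + 1 - kn) / 2 ≤ m / 2 := by omega
        have hgm : pvG nums m = pvG nums (2 * (m / 2) + 1) := by congr 1; omega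
        have hsum : (pvQO nums ((m+1-kn)/2) (m/2)).sum + pvG nums (2 * (m/2) + 1)
            = (pvQO nums ((m+1-kn)/2) (m/2 + 1)).sum := by
          rw [pvQO_append nums hpo]; simp
        have hne : pvQE nums ((m+2-kn)/2) ((m+1)/2) ≠ [] := by
          unfold pvQE
          simp only [ne_eq, List.map_eq_nil_iff, List.range_eq_nil]
          omega
        rw [hgm, hsum, ← pvQO_append nums hpo, ← pv_tail_sum _ hne, pvQE_tail nums (by omega)]
        simp only [Prod.mk.injEq]
        refine ⟨pvQE_congr nums (by omega) (by omega), pvQO_congr nums (by omega) (by omega),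
          congrArg List.sum (pvQE_congr nums (by omega) (by omega)),
          congrArg List.sum (pvQO_congr nums (by omega) (by omega)), ?_⟩
        rw [show m + 1 + 1 - kn = (m + 1 - kn) + 1 from by omega, List.range_succ, List.map_append]
        congr 1
        rw [pvQE_sum]
        congr 2
        exact pvW_congr nums (by omega) (by omega)
    · rw [if_neg hr]
      by_cases hm : m % 2 = 0
      · simp only [if_pos hm]
        have hpp : (m + 2 - kn) / 2 ≤ (m + 1) / 2 := by omega
        have hgm : pvG nums m = pvG nums (2 * ((m + 1) / 2)) := by congr 1; omega
        have hsum : (pvQE nums ((m+2-kn)/2) ((m+1)/2)).sum + pvG nums (2 * ((m+1)/2))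
            = (pvQE nums ((m+2-kn)/2) ((m+1)/2 + 1)).sum := by
          rw [pvQE_append nums hpp]; simp
        have hne : pvQO nums ((m+1-kn)/2) (m/2) ≠ [] := by
          unfold pvQO
          simp only [ne_eq, List.map_eq_nil_iff, List.range_eq_nil]
          omega
        rw [hgm, hsum, ← pvQE_append nums hpp, ← pv_tail_sum _ hne, pvQO_tail nums (by omega)]
        simp only [Prod.mk.injEq]
        refine ⟨pvQE_congr nums (by omega) (by omega), pvQO_congr nums (by omega) (by omega),
          congrArg List.sum (pvQE_congr nums (by omega) (by omega)),
          congrArg List.sum (pvQO_congr nums (by omega) (by omega)), ?_⟩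
        rw [show m + 1 + 1 - kn = (m + 1 - kn) + 1 from by omega, List.range_succ, List.map_append]
        congr 1
        rw [pvQO_sum]
        congr 2
        exact pvW_congr nums (by omega) (by omega)
      · simp only [if_neg hm]
        have hpo : (m + 1 - kn) / 2 ≤ m / 2 := by omega
        have hgm : pvG nums m = pvG nums (2 * (m / 2) + 1) := by congr 1; omega
        have hsum : (pvQO nums ((m+1-kn)/2) (m/2)).sum + pvG nums (2 * (m/2) + 1)
            = (pvQO nums ((m+1-kn)/2) (m/2 + 1)).sum := by
          rw [pvQO_append nums hpo]; simp
        have hne : pvQO nums ((m+1-kn)/2) (m/2 + 1) ≠ [] := by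
          unfold pvQO
          simp only [ne_eq, List.map_eq_nil_iff, List.range_eq_nil]
          omega
        rw [hgm, hsum, ← pvQO_append nums hpo, ← pv_tail_sum _ hne, pvQO_tail nums (by omega)]
        simp only [Prod.mk.injEq]
        refine ⟨pvQE_congr nums (by omega) (by omega), pvQO_congr nums (by omega) (by omega),
          congrArg List.sum (pvQE_congr nums (by omega) (by omega)),
          congrArg List.sum (pvQO_congr nums (by omega) (by omega)), ?_⟩
        rw [show m + 1 + 1 - kn = (m + 1 - kn) + 1 from by omega, List.range_succ, List.map_append]
        congr 1
        rw [pvQO_sum]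
        congr 2
        exact pvW_congr nums (by omega) (by omega)
  · have hw' : m + 1 < kn := by omega
    rw [if_neg hw]
    simp only [Nat.cast_eq_zero]
    by_cases hm : m % 2 = 0
    · simp only [if_pos hm]
      have hpp : (m + 2 - kn) / 2 ≤ (m + 1) / 2 := by omega
      have hgm : pvG nums m = pvG nums (2 * ((m + 1) / 2)) := by congr 1; omega
      have hsum : (pvQE nums ((m+2-kn)/2) ((m+1)/2)).sum + pvG nums (2 * ((m+1)/2))
          = (pvQE nums ((m+2-kn)/2) ((m+1)/2 + 1)).sum := by
        rw [pvQE_append nums hpp]; simp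
      rw [hgm, hsum, ← pvQE_append nums hpp]
      simp only [Prod.mk.injEq]
      exact ⟨pvQE_congr nums (by omega) (by omega), pvQO_congr nums (by omega) (by omega),
        congrArg List.sum (pvQE_congr nums (by omega) (by omega)),
        congrArg List.sum (pvQO_congr nums (by omega) (by omega)),
        congrArg _ (congrArg List.range (by omega))⟩
    · simp only [if_neg hm]
      have hpo : (m + 1 - kn) / 2 ≤ m / 2 := by omega
      have hgm : pvG nums m = pvG nums (2 * (m / 2) + 1) := by congr 1; omega
      have hsum : (pvQO nums ((m+1-kn)/2) (m/2)).sum + pvG nums (2 * (m/2) + 1)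
          = (pvQO nums ((m+1-kn)/2) (m/2 + 1)).sum := by
        rw [pvQO_append nums hpo]; simp
      rw [hgm, hsum, ← pvQO_append nums hpo]
      simp only [Prod.mk.injEq]
      exact ⟨pvQE_congr nums (by omega) (by omega), pvQO_congr nums (by omega) (by omega),
        congrArg List.sum (pvQE_congr nums (by omega) (by omega)),
        congrArg List.sum (pvQO_congr nums (by omega) (by omega)),
        congrArg _ (congrArg List.range (by omega))⟩

lemma pvLoopA (nums : List Int) (kn : Nat) (hk : 1 ≤ kn) (m : Nat) :
    (PySem.List.pyRange 0 (m : Int) 1).foldl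
      (pvStepA nums (kn : Int)) ([], [], 0, 0, []) = pvSt nums kn m := by
  induction m with
  | zero =>
      rw [PySem.List.pyRange_one_eq_nil (by omega)]
      simp [pvSt, pvQE, pvQO, pvW]
      omega
  | succ m ih =>
      have hc : ((m + 1 : Nat) : Int) = (m : Int) + 1 := by push_cast; ring
      rw [hc, PySem.List.pyRange_one_succ_right (by positivity), List.foldl_append, ih]
      simp only [List.foldl_cons, List.foldl_nil]
      exact pvStep_inv nums kn hk m

-- ===== VERDICT (by name: the statement is the Claim_ definition above) =====
theorem cal_moving_avg_every_other_num_spec : Claim_equal_cal_moving_avg_every_other_num := by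
  intro nums k _
  unfold Spec_cal_moving_avg_every_other_num cal_moving_avg_every_other_num
    cal_moving_avg_every_other_num_alt
  by_cases hg : nums = [] ∨ k ≤ 0 ∨ k > (nums.length : Int)
  · rw [if_pos hg, if_pos hg]
  · rw [if_neg hg, if_neg hg]
    push Not at hg
    obtain ⟨hne, hk0, hkn⟩ := hg
    obtain ⟨kn, rfl⟩ : ∃ kn : Nat, k = (kn : Int) := ⟨k.toNat, by omega⟩
    have hk1 : 1 ≤ kn := by exact_mod_cast hk0
    have hkn' : kn ≤ nums.length := by exact_mod_cast hkn
    rw [pvLoopA nums kn hk1 nums.length]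
    simp only [pvSt]
    -- normalise B's outer range
    have hb : ((nums.length : Int) - (kn : Int) + 1) = ((nums.length + 1 - kn : Nat) : Int) := by
      omega
    rw [hb, PySem.List.pyRange_one, List.map_map]
    simp only [Int.sub_zero, Int.toNat_natCast]
    refine (pvRangeMap_ext _ _ _ _ rfl ?_).symm
    intro j hj
    simp only [Function.comp]
    -- normalise B's inner strided range
    rw [PySem.List.pyRange_of_pos 0 (kn : Int) (by omega)]
    rw [if_pos (by exact_mod_cast hk1 : (0 : Int) < (kn : Int))]
    have hc : (((kn : Int) - 0 + 2 - 1) / 2).toNat = (kn + 1) / 2 := by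
      omega
    rw [hc, List.map_map]
    congr 1
    unfold pvW
    refine congrArg List.sum (pvRangeMap_ext _ _ _ _ rfl ?_)
    intro t ht
    simp only [Function.comp]
    have harg : (0 : Int) + (j : Int) + ((0 : Int) + 2 * (t : Int)) = ((j + 2 * t : Nat) : Int) := by
      push_cast; ring
    rw [harg, PySem.List.pyGetD_natCast]
    rfl
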